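-- pv_equiv track=rewrite | github.com/christianslothouber/advent-of-code | 2015/d03/solution.py | find_visited_houses
-- ===== SOURCE A (Python) =====
-- def visit_house(instruction, point):
--     x, y = point
--
--     if instruction == '>': x += 1
--     if instruction == '<': x -= 1
--     if instruction == '^': y += 1
--     if instruction == 'v': y -= 1
--
--     house = (x, y)
--
--     return house
--
-- def find_visited_houses(instructions):
--     santa = (0, 0)
--     houses = {santa}
--
--     for instruction in instructions:
--         house = visit_house(instruction, santa)
--         houses.add(house)
--         santa = house
--
--     return houses
-- ===== SOURCE B (Python) =====
-- DELTA = {'>': (1, 0), '<': (-1, 0), '^': (0, 1), 'v': (0, -1)}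
--
-- def find_visited_houses(instructions):
--     # Divide and conquer: visited(s) = visited(left) | (visited(right) shifted by
--     # left's net displacement); each call returns (net displacement, visited set).
--     def walk(s):
--         if len(s) == 0:
--             return (0, 0), {(0, 0)}
--         if len(s) == 1:
--             d = DELTA.get(s, (0, 0))
--             return d, {(0, 0), d}
--         m = len(s) // 2
--         (lx, ly), lh = walk(s[:m])
--         (rx, ry), rh = walk(s[m:])
--         return (lx + rx, ly + ry), lh | {(x + lx, y + ly) for (x, y) in rh}
--     return walk(instructions)[1]
-- ===== Notes on version B (the rewrite author's own statement) =====
-- stated objective: alternative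
-- what changed: B replaces A's sequential walk (threading santa through visit_house and adding one house per step) by a divide-and-conquer recursion: each half of the string is solved independently, returning (net displacement, visited set), and the halves are combined by translating the right half's set by the left half's net displacement and taking the union.
import Mathlib
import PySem

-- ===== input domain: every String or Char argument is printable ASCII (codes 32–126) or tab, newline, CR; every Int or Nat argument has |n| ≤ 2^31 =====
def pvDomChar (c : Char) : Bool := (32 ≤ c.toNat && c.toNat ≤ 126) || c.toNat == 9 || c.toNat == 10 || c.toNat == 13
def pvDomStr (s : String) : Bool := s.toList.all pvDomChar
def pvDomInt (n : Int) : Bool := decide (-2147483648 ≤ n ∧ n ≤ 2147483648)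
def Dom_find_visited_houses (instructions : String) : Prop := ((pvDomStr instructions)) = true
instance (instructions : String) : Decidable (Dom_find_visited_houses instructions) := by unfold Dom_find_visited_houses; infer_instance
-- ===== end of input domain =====

-- B solves the two halves of the string independently by divide and conquer, each call
-- returning (net displacement, visited set), and combines them by translating the right
-- half's set by the left half's displacement (objective: alternative).

-- ===== PORT A =====
def visit_house (instruction : Char) (point : Int × Int) : Int × Int :=
  let x := point.1
  let y := point.2
  let x := if instruction = '>' then x + 1 else x
  let x := if instruction = '<' then x - 1 else x
  let y := if instruction = '^' then y + 1 else y
  let y := if instruction = 'v' then y - 1 else y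
  (x, y)

def find_visited_houses (instructions : String) : List (Int × Int) :=
  let santa : Int × Int := (0, 0)
  let houses : PySem.Set (Int × Int) := PySem.Set.ofList [santa]
  (instructions.toList.foldl
    (fun st c =>
      let house := visit_house c st.1
      (house, PySem.Set.add st.2 house))
    (santa, houses)).2

-- ===== PORT B =====
-- DELTA keyed by the one-character string = by its character.
def pvDELTA : PySem.Dict Char (Int × Int) :=
  ((((PySem.Dict.empty).insert '>' (1, 0)).insert '<' (-1, 0)).insert '^' (0, 1)).insert 'v' (0, -1)

-- walk(s): Python's s[:m] / s[m:] with 0 ≤ m ≤ len(s) are exactly List.take / List.drop.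
def pvWalk : List Char → (Int × Int) × PySem.Set (Int × Int)
  | [] => ((0, 0), PySem.Set.ofList [(0, 0)])
  | [c] =>
      let d := pvDELTA.getD c (0, 0)
      (d, PySem.Set.ofList [(0, 0), d])
  | c1 :: c2 :: rest =>
      let s := c1 :: c2 :: rest
      let m := s.length / 2
      let lw := pvWalk (s.take m)
      let rw := pvWalk (s.drop m)
      ((lw.1.1 + rw.1.1, lw.1.2 + rw.1.2),
       PySem.Set.update lw.2 (rw.2.map (fun p => (p.1 + lw.1.1, p.2 + lw.1.2))))
termination_by s => s.length
decreasing_by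
  · simpa [List.length_take] using by omega
  · simp; omega

def find_visited_houses_alt (instructions : String) : List (Int × Int) :=
  (pvWalk instructions.toList).2

-- ===== PRECONDITION & SPEC =====
def Spec_find_visited_houses (instructions : String) (out : List (Int × Int)) : Prop := out = find_visited_houses_alt instructions
instance (instructions : String) (out : List (Int × Int)) : Decidable (Spec_find_visited_houses instructions out) := by unfold Spec_find_visited_houses; infer_instance

-- ===== CLAIM (what is proved, stated in full; the proofs are below) =====
def Claim_equal_find_visited_houses : Prop := ∀ (instructions : String), Dom_find_visited_houses instructions → Spec_find_visited_houses instructions (find_visited_houses instructions)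

-- ===== LEMMAS AND PROOFS =====

/-- The trajectory of positions A visits after each move, starting at `p`. -/
def pvTraj (p : Int × Int) : List Char → List (Int × Int)
  | [] => []
  | c :: cs => let h := visit_house c p; h :: pvTraj h cs

/-- The endpoint after following `cs` from `p`. -/
def pvEnd (p : Int × Int) (cs : List Char) : Int × Int :=
  cs.foldl (fun q c => visit_house c q) p

theorem visit_house_delta (c : Char) (a b : Int) :
    visit_house c (a, b)
      = (a + (if c = '>' then 1 else 0) - (if c = '<' then 1 else 0),
         b + (if c = '^' then 1 else 0) - (if c = 'v' then 1 else 0)) := by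
  simp only [visit_house]
  by_cases h1 : c = '>' <;> by_cases h2 : c = '<' <;>
    by_cases h3 : c = '^' <;> by_cases h4 : c = 'v' <;> simp_all

/-- B's dict lookup is A's if-chain applied at the origin. -/
theorem pvDELTA_getD (c : Char) : pvDELTA.getD c (0, 0) = visit_house c (0, 0) := by
  by_cases h1 : c = '>' <;> by_cases h2 : c = '<' <;>
    by_cases h3 : c = '^' <;> by_cases h4 : c = 'v' <;>
  simp_all [pvDELTA, PySem.Dict.getD_insert, visit_house_delta]

theorem visit_house_translate (c : Char) (p d : Int × Int) :
    visit_house c (p.1 + d.1, p.2 + d.2)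
      = ((visit_house c p).1 + d.1, (visit_house c p).2 + d.2) := by
  obtain ⟨a, b⟩ := p
  simp only [visit_house_delta, Prod.mk.injEq]
  constructor <;> ring

theorem pvEnd_cons (p : Int × Int) (c : Char) (cs : List Char) :
    pvEnd p (c :: cs) = pvEnd (visit_house c p) cs := rfl

theorem pvEnd_translate (cs : List Char) : ∀ (p d : Int × Int),
    pvEnd (p.1 + d.1, p.2 + d.2) cs = ((pvEnd p cs).1 + d.1, (pvEnd p cs).2 + d.2) := by
  induction cs with
  | nil => intro p d; rfl
  | cons c cs ih =>
    intro p d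
    rw [pvEnd_cons, pvEnd_cons, visit_house_translate, ih]

theorem pvTraj_append (l r : List Char) : ∀ (p : Int × Int),
    pvTraj p (l ++ r) = pvTraj p l ++ pvTraj (pvEnd p l) r := by
  induction l with
  | nil => intro p; rfl
  | cons c cs ih => intro p; simp [pvTraj, pvEnd_cons, ih]

theorem pvTraj_translate (cs : List Char) : ∀ (p d : Int × Int),
    pvTraj (p.1 + d.1, p.2 + d.2) cs
      = (pvTraj p cs).map (fun q => (q.1 + d.1, q.2 + d.2)) := by
  induction cs with
  | nil => intro p d; rfl
  | cons c cs ih =>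
    intro p d
    simp only [pvTraj, visit_house_translate, ih]
    rfl

theorem pvEnd_mem (cs : List Char) : ∀ (p : Int × Int), pvEnd p cs ∈ p :: pvTraj p cs := by
  induction cs with
  | nil => intro p; simp [pvEnd, pvTraj]
  | cons c cs ih =>
    intro p
    rw [pvEnd_cons]
    rcases List.mem_cons.mp (ih (visit_house c p)) with h | h
    · simp [pvTraj, h]
    · right; simp only [pvTraj]; exact List.mem_cons_of_mem _ h

/-- `ofList` commutes with translation (an injective map). -/
theorem ofList_map_trans (d : Int × Int) (zs : List (Int × Int)) :
    PySem.Set.ofList (zs.map (fun q => (q.1 + d.1, q.2 + d.2)))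
      = (PySem.Set.ofList zs).map (fun q => (q.1 + d.1, q.2 + d.2)) := by
  induction zs using List.reverseRecOn with
  | nil => rfl
  | append_singleton zs x ih =>
    rw [List.map_append, List.map_singleton, PySem.Set.ofList_append_singleton,
        PySem.Set.ofList_append_singleton, ih, PySem.Set.add_eq_ite, PySem.Set.add_eq_ite]
    have hmem : (x.1 + d.1, x.2 + d.2) ∈
        (PySem.Set.ofList zs).map (fun q => (q.1 + d.1, q.2 + d.2))
        ↔ x ∈ PySem.Set.ofList zs := by
      constructor
      · intro h
        obtain ⟨a, ha, he⟩ := List.mem_map.mp h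
        obtain ⟨a1, a2⟩ := a; obtain ⟨x1, x2⟩ := x
        simp only [Prod.mk.injEq] at he
        have : a1 = x1 ∧ a2 = x2 := ⟨by omega, by omega⟩
        simpa [this.1, this.2] using ha
      · intro h; exact List.mem_map.mpr ⟨x, h, rfl⟩
    by_cases hx : x ∈ PySem.Set.ofList zs
    · rw [if_pos hx, if_pos (hmem.mpr hx)]
    · rw [if_neg hx, if_neg (fun h => hx (hmem.mp h)), List.map_append, List.map_singleton]

/-- Updating with a deduplicated list is updating with the list. -/
theorem update_ofList_right (S : PySem.Set (Int × Int)) (zs : List (Int × Int)) :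
    PySem.Set.update S (PySem.Set.ofList zs) = PySem.Set.update S zs := by
  rw [PySem.Set.update_eq_append_filter, PySem.Set.update_eq_append_filter,
      PySem.Set.ofList_ofList]

/-- A repeated element in the middle may be dropped under `ofList`. -/
theorem ofList_mid_mem (xs ys : List (Int × Int)) (y : Int × Int) (h : y ∈ xs) :
    PySem.Set.ofList (xs ++ y :: ys) = PySem.Set.ofList (xs ++ ys) := by
  rw [PySem.Set.ofList_append, PySem.Set.ofList_append, PySem.Set.update_cons,
      PySem.Set.add_of_mem ((PySem.Set.mem_ofList xs y).mpr h)]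

theorem pvEnd_from (d : Int × Int) (cs : List Char) :
    pvEnd d cs = ((pvEnd (0, 0) cs).1 + d.1, (pvEnd (0, 0) cs).2 + d.2) := by
  simpa using pvEnd_translate cs (0, 0) d

theorem pvTraj_from (d : Int × Int) (cs : List Char) :
    pvTraj d cs = (pvTraj (0, 0) cs).map (fun q => (q.1 + d.1, q.2 + d.2)) := by
  simpa using pvTraj_translate cs (0, 0) d

/-- The endpoint of a concatenation is the sum of the halves' endpoints. -/
theorem pvEnd_split (l r : List Char) :
    pvEnd (0, 0) (l ++ r)
      = ((pvEnd (0, 0) l).1 + (pvEnd (0, 0) r).1, (pvEnd (0, 0) l).2 + (pvEnd (0, 0) r).2) := by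
  have h : pvEnd (0, 0) (l ++ r) = pvEnd (pvEnd (0, 0) l) r := by
    simp [pvEnd, List.foldl_append]
  rw [h, pvEnd_from]
  simp [Int.add_comm]

/-- B's combine step rebuilds the deduplicated trajectory of the concatenation. -/
theorem pvSet_split (l r : List Char) :
    PySem.Set.update (PySem.Set.ofList ((0, 0) :: pvTraj (0, 0) l))
      ((PySem.Set.ofList ((0, 0) :: pvTraj (0, 0) r)).map
        (fun q => (q.1 + (pvEnd (0, 0) l).1, q.2 + (pvEnd (0, 0) l).2)))
      = PySem.Set.ofList ((0, 0) :: pvTraj (0, 0) (l ++ r)) := by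
  rw [← ofList_map_trans, update_ofList_right, ← PySem.Set.ofList_append]
  have hmap : ((0, 0) :: pvTraj (0, 0) r).map
        (fun q : Int × Int => (q.1 + (pvEnd (0, 0) l).1, q.2 + (pvEnd (0, 0) l).2))
      = pvEnd (0, 0) l :: pvTraj (pvEnd (0, 0) l) r := by
    rw [List.map_cons, ← pvTraj_from]
    simp
  rw [hmap, ofList_mid_mem _ _ _ (pvEnd_mem l (0, 0)), List.cons_append, ← pvTraj_append]

/-- B's recursion computes the endpoint and the deduplicated trajectory from the origin. -/
theorem pvWalk_eq (s : List Char) :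
    pvWalk s = (pvEnd (0, 0) s, PySem.Set.ofList ((0, 0) :: pvTraj (0, 0) s)) := by
  induction s using pvWalk.induct with
  | case1 => simp [pvWalk, pvEnd, pvTraj]
  | case2 c => simp [pvWalk, pvDELTA_getD, pvEnd, pvTraj]
  | case3 c1 c2 rest s m ihl ihr =>
    simp only [pvWalk]
    rw [ihl, ihr]
    conv_rhs => rw [← List.take_append_drop ((c1 :: c2 :: rest).length / 2) (c1 :: c2 :: rest)]
    rw [pvEnd_split, pvSet_split]

/-- A's loop extends the set with exactly the trajectory it walks. -/
theorem foldl_snd_eq_update (cs : List Char) : ∀ (p : Int × Int) (S : PySem.Set (Int × Int)),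
    (cs.foldl (fun st c => let h := visit_house c st.1; (h, PySem.Set.add st.2 h)) (p, S)).2
      = PySem.Set.update S (pvTraj p cs) := by
  induction cs with
  | nil => intro p S; simp [pvTraj, PySem.Set.update]
  | cons c cs ih => intro p S; simp [pvTraj, List.foldl_cons, ih, PySem.Set.update]

/-- A's loop produces the deduplicated trajectory from the origin. -/
theorem find_visited_houses_eq (s : String) :
    find_visited_houses s = PySem.Set.ofList ((0, 0) :: pvTraj (0, 0) s.toList) := by
  unfold find_visited_houses
  simp only
  rw [foldl_snd_eq_update, ← PySem.Set.ofList_append]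
  rfl

-- ===== VERDICT (by name: the statement is the Claim_ definition above) =====
theorem find_visited_houses_spec : Claim_equal_find_visited_houses := by
  intro s _
  unfold Spec_find_visited_houses find_visited_houses_alt
  rw [find_visited_houses_eq, pvWalk_eq]
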